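-- pv_equiv track=rewrite | github.com/GitAnda/AIVDkerstpuzzel | 2020/14.py | is_word_connected
-- ===== SOURCE A (Python) =====
-- def is_word_connected(loc, direction, word_len, board):
--     empty = [".", "d", "t", "2", "3"]
--
--     tiles = []
--     if direction == 'h':
--         if loc[0] > 0:
--             tiles = tiles + board[loc[0]-1][loc[1]:loc[1]+word_len]
--         if loc[0] < 14:
--             tiles = tiles + board[loc[0]+1][loc[1]:loc[1]+word_len]
--         if loc[1] > 0:
--             tiles = tiles + list(board[loc[0]][loc[1]-1])
--         if loc[1]+word_len-1 < 14:
--             tiles = tiles + list(board[loc[0]][loc[1]+word_len])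
--
--     if direction == 'v':
--         if loc[1] > 0:
--             tiles = tiles + [x[loc[1]-1] for x in board[loc[0]:loc[0]+word_len]]
--         if loc[1] < 14:
--             tiles = tiles + [x[loc[1]+1] for x in board[loc[0]:loc[0]+word_len]]
--         if loc[0] > 0:
--             tiles = tiles + list(board[loc[0]-1][loc[1]])
--         if loc[0]+word_len-1 < 14:
--             tiles = tiles + list(board[loc[0]+word_len][loc[1]])
--
--     tiles = ''.join(tiles)
--
--     for c in empty:
--         tiles = tiles.replace(c, '')
--
--     if len(tiles) == 0:
--         return False
--     else:
--         return True
-- ===== SOURCE B (Python) =====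
-- EMPTY = ('.', 'd', 't', '2', '3')
--
--
-- def _occupied(cells):
--     for cell in cells:
--         for ch in cell:
--             if ch not in EMPTY:
--                 return True
--     return False
--
--
-- def is_word_connected(loc, direction, word_len, board):
--     r, c = loc
--     if direction == 'h':
--         if r > 0 and _occupied(board[r - 1][c:c + word_len]):
--             return True
--         if r < 14 and _occupied(board[r + 1][c:c + word_len]):
--             return True
--         if c > 0 and _occupied([board[r][c - 1]]):
--             return True
--         if c + word_len - 1 < 14 and _occupied([board[r][c + word_len]]):
--             return True
--     elif direction == 'v':
--         if c > 0 and _occupied([x[c - 1] for x in board[r:r + word_len]]):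
--             return True
--         if c < 14 and _occupied([x[c + 1] for x in board[r:r + word_len]]):
--             return True
--         if r > 0 and _occupied([board[r - 1][c]]):
--             return True
--         if r + word_len - 1 < 14 and _occupied([board[r + word_len][c]]):
--             return True
--     return False
-- ===== Notes on version B (the rewrite author's own statement) =====
-- stated objective: simpler
-- what changed: B drops A's build-a-tiles-list, join-to-string and five replace passes, and instead scans the characters of each guarded neighbour segment directly, returning True at the first character outside the empty-marker set and False otherwise.
import Mathlib
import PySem

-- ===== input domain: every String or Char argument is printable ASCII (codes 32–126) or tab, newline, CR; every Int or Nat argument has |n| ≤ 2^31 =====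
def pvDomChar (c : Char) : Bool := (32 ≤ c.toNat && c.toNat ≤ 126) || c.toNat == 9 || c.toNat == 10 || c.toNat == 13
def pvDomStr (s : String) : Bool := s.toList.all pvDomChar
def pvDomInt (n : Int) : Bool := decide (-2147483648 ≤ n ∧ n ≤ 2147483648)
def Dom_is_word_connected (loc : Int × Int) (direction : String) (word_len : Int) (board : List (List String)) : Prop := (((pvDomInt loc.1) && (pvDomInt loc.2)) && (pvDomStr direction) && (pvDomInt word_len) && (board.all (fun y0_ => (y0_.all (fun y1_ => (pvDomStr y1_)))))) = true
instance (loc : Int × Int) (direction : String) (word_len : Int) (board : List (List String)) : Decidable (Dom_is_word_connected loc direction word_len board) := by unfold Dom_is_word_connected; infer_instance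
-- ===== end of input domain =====

-- B replaces the join-string-then-strip-markers pipeline by a direct early-exit scan of the
-- neighbour cells' characters (objective: simpler; return value only, no side effects involved).
-- ===== PORT A =====
def is_word_connected (loc : Int × Int) (direction : String) (word_len : Int) (board : List (List String)) : Bool :=
  let empty : List String := [".", "d", "t", "2", "3"]
  let tiles : List String := []
  let tiles := if direction == "h" then
      let tiles := if loc.1 > 0 then
          tiles ++ PySem.List.slice (PySem.List.pyGetD board (loc.1 - 1) []) (some loc.2) (some (loc.2 + word_len)) else tiles
      let tiles := if loc.1 < 14 then
          tiles ++ PySem.List.slice (PySem.List.pyGetD board (loc.1 + 1) []) (some loc.2) (some (loc.2 + word_len)) else tiles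
      let tiles := if loc.2 > 0 then
          tiles ++ (PySem.List.pyGetD (PySem.List.pyGetD board loc.1 []) (loc.2 - 1) "").toList.map (fun ch => String.ofList [ch]) else tiles
      let tiles := if loc.2 + word_len - 1 < 14 then
          tiles ++ (PySem.List.pyGetD (PySem.List.pyGetD board loc.1 []) (loc.2 + word_len) "").toList.map (fun ch => String.ofList [ch]) else tiles
      tiles
    else tiles
  let tiles := if direction == "v" then
      let tiles := if loc.2 > 0 then
          tiles ++ (PySem.List.slice board (some loc.1) (some (loc.1 + word_len))).map (fun x => PySem.List.pyGetD x (loc.2 - 1) "") else tiles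
      let tiles := if loc.2 < 14 then
          tiles ++ (PySem.List.slice board (some loc.1) (some (loc.1 + word_len))).map (fun x => PySem.List.pyGetD x (loc.2 + 1) "") else tiles
      let tiles := if loc.1 > 0 then
          tiles ++ (PySem.List.pyGetD (PySem.List.pyGetD board (loc.1 - 1) []) loc.2 "").toList.map (fun ch => String.ofList [ch]) else tiles
      let tiles := if loc.1 + word_len - 1 < 14 then
          tiles ++ (PySem.List.pyGetD (PySem.List.pyGetD board (loc.1 + word_len) []) loc.2 "").toList.map (fun ch => String.ofList [ch]) else tiles
      tiles
    else tiles
  let joined : String := PySem.Str.join "" tiles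
  let stripped : String := empty.foldl (fun t c => PySem.Str.replace t c "") joined
  if PySem.Str.len stripped == 0 then false else true

-- ===== PORT B =====
-- 'ch not in EMPTY' compares 1-char strings in Python; ported exactly as character membership.
def pvEmptyChars : List Char := ['.', 'd', 't', '2', '3']

def pvOccupied (cells : List String) : Bool :=
  cells.any (fun cell => cell.toList.any (fun ch => !(pvEmptyChars.contains ch)))

def is_word_connected_alt (loc : Int × Int) (direction : String) (word_len : Int) (board : List (List String)) : Bool :=
  if direction == "h" then
    if loc.1 > 0 && pvOccupied (PySem.List.slice (PySem.List.pyGetD board (loc.1 - 1) []) (some loc.2) (some (loc.2 + word_len))) then true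
    else if loc.1 < 14 && pvOccupied (PySem.List.slice (PySem.List.pyGetD board (loc.1 + 1) []) (some loc.2) (some (loc.2 + word_len))) then true
    else if loc.2 > 0 && pvOccupied [PySem.List.pyGetD (PySem.List.pyGetD board loc.1 []) (loc.2 - 1) ""] then true
    else if loc.2 + word_len - 1 < 14 && pvOccupied [PySem.List.pyGetD (PySem.List.pyGetD board loc.1 []) (loc.2 + word_len) ""] then true
    else false
  else if direction == "v" then
    if loc.2 > 0 && pvOccupied ((PySem.List.slice board (some loc.1) (some (loc.1 + word_len))).map (fun x => PySem.List.pyGetD x (loc.2 - 1) "")) then true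
    else if loc.2 < 14 && pvOccupied ((PySem.List.slice board (some loc.1) (some (loc.1 + word_len))).map (fun x => PySem.List.pyGetD x (loc.2 + 1) "")) then true
    else if loc.1 > 0 && pvOccupied [PySem.List.pyGetD (PySem.List.pyGetD board (loc.1 - 1) []) loc.2 ""] then true
    else if loc.1 + word_len - 1 < 14 && pvOccupied [PySem.List.pyGetD (PySem.List.pyGetD board (loc.1 + word_len) []) loc.2 ""] then true
    else false
  else false

-- ===== PRECONDITION & SPEC =====
-- Pre_ excludes exactly the inputs on which Python A raises an IndexError: every board/row
-- index A evaluates (in the branches its guards select) must be in Python range.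
def Pre_is_word_connected (loc : Int × Int) (direction : String) (word_len : Int) (board : List (List String)) : Prop :=
  (direction = "h" →
    (loc.1 > 0 → PySem.Raise.InRange board.length (loc.1 - 1)) ∧
    (loc.1 < 14 → PySem.Raise.InRange board.length (loc.1 + 1)) ∧
    (loc.2 > 0 ∨ loc.2 + word_len - 1 < 14 → PySem.Raise.InRange board.length loc.1) ∧
    (loc.2 > 0 → PySem.Raise.InRange (PySem.List.pyGetD board loc.1 []).length (loc.2 - 1)) ∧
    (loc.2 + word_len - 1 < 14 → PySem.Raise.InRange (PySem.List.pyGetD board loc.1 []).length (loc.2 + word_len))) ∧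
  (direction = "v" →
    (loc.2 > 0 → ∀ x ∈ PySem.List.slice board (some loc.1) (some (loc.1 + word_len)), PySem.Raise.InRange x.length (loc.2 - 1)) ∧
    (loc.2 < 14 → ∀ x ∈ PySem.List.slice board (some loc.1) (some (loc.1 + word_len)), PySem.Raise.InRange x.length (loc.2 + 1)) ∧
    (loc.1 > 0 → PySem.Raise.InRange board.length (loc.1 - 1) ∧ PySem.Raise.InRange (PySem.List.pyGetD board (loc.1 - 1) []).length loc.2) ∧
    (loc.1 + word_len - 1 < 14 → PySem.Raise.InRange board.length (loc.1 + word_len) ∧ PySem.Raise.InRange (PySem.List.pyGetD board (loc.1 + word_len) []).length loc.2))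
instance (loc : Int × Int) (direction : String) (word_len : Int) (board : List (List String)) : Decidable (Pre_is_word_connected loc direction word_len board) := by unfold Pre_is_word_connected; infer_instance

def pvWitness_is_word_connected : (Int × Int) × String × Int × List (List String) :=
  ((1, 1), "h", 2,
   [["." , ".", ".", "."], [".", "a", "b", "."], [".", ".", ".", "."], [".", ".", ".", "."]])

def Spec_is_word_connected (loc : Int × Int) (direction : String) (word_len : Int) (board : List (List String)) (out : Bool) : Prop := out = is_word_connected_alt loc direction word_len board
instance (loc : Int × Int) (direction : String) (word_len : Int) (board : List (List String)) (out : Bool) : Decidable (Spec_is_word_connected loc direction word_len board out) := by unfold Spec_is_word_connected; infer_instance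

-- ===== CLAIM (what is proved, stated in full; the proofs are below) =====
def Claim_equal_is_word_connected : Prop := ∀ (loc : Int × Int) (direction : String) (word_len : Int) (board : List (List String)), Dom_is_word_connected loc direction word_len board → Pre_is_word_connected loc direction word_len board → Spec_is_word_connected loc direction word_len board (is_word_connected loc direction word_len board)

-- ===== LEMMAS AND PROOFS =====

-- replacing a single character by the empty string filters that character out
theorem pv_replace_go_single (c : Char) : ∀ (l : List Char) (fuel : Nat) (acc : List Char), l.length ≤ fuel →
    PySem.Chars.replace.go [c] [] fuel l acc = acc.reverse ++ l.filter (fun x => x ≠ c) := by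
  intro l
  induction l with
  | nil =>
    intro fuel acc _
    cases fuel <;> simp [PySem.Chars.replace.go]
  | cons h t ih =>
    intro fuel acc hlen
    cases fuel with
    | zero => simp at hlen
    | succ f =>
      rw [PySem.Chars.replace.go]
      by_cases hc : h = c
      · subst hc
        simp only [List.isPrefixOf, beq_self_eq_true, Bool.true_and, if_pos, List.length_cons,
          List.length_nil, List.drop_succ_cons, List.drop_zero, List.reverse_nil, List.nil_append]
        rw [ih f acc (by simpa using Nat.le_of_succ_le_succ hlen)]
        simp
      · have : List.isPrefixOf [c] (h :: t) = false := by
          simp [List.isPrefixOf]; exact fun hh => absurd hh.symm hc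
        rw [this]
        simp only [Bool.false_eq_true, if_false]
        rw [ih f (h :: acc) (by simpa using Nat.le_of_succ_le_succ hlen)]
        simp [hc]

theorem pv_replace_single (cs : List Char) (c : Char) :
    PySem.Chars.replace cs [c] [] = cs.filter (fun x => x ≠ c) := by
  rw [PySem.Chars.replace]
  simp [pv_replace_go_single c cs cs.length [] (le_refl _)]

theorem pv_flatten_intersperse (l : List (List Char)) :
    (List.intersperse [] l).flatten = l.flatten := by
  induction l with
  | nil => simp
  | cons a t ih =>
    cases t with
    | nil => simp
    | cons b t2 => simp only [List.intersperse, List.flatten_cons] at *; simp [ih]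

-- A's join-then-strip pipeline decided nonempty ⟺ B's occupancy scan
theorem pv_A_eval (tiles : List String) :
    (if PySem.Str.len ([(".":String), "d", "t", "2", "3"].foldl (fun t c => PySem.Str.replace t c "") (PySem.Str.join "" tiles)) == 0 then false else true)
      = pvOccupied tiles := by
  have hjoin : (PySem.Str.join "" tiles).toList = (tiles.map String.toList).flatten := by
    simp only [PySem.Str.join, PySem.Chars.join, String.toList_ofList, List.intercalate]
    have : (String.toList "") = [] := rfl
    rw [this, pv_flatten_intersperse]
  have hfold : ([(".":String), "d", "t", "2", "3"].foldl (fun t c => PySem.Str.replace t c "") (PySem.Str.join "" tiles)).toList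
      = (tiles.map String.toList).flatten.filter (fun x => !(pvEmptyChars.contains x)) := by
    have e1 : (".":String).toList = ['.'] := rfl
    have e2 : ("d":String).toList = ['d'] := rfl
    have e3 : ("t":String).toList = ['t'] := rfl
    have e4 : ("2":String).toList = ['2'] := rfl
    have e5 : ("3":String).toList = ['3'] := rfl
    have e0 : ("":String).toList = [] := rfl
    simp only [List.foldl, PySem.Str.replace, String.toList_ofList, e1, e2, e3, e4, e5, e0,
      pv_replace_single, hjoin]
    rw [List.filter_filter, List.filter_filter, List.filter_filter, List.filter_filter]
    congr 1
    funext x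
    simp [pvEmptyChars]
    ac_rfl
  have hlen : PySem.Str.len ([(".":String), "d", "t", "2", "3"].foldl (fun t c => PySem.Str.replace t c "") (PySem.Str.join "" tiles))
      = ((tiles.map String.toList).flatten.filter (fun x => !(pvEmptyChars.contains x))).length := by
    rw [← hfold]; simp [PySem.Str.len]
  rw [hlen]
  rcases h : (tiles.map String.toList).flatten.filter (fun x => !(pvEmptyChars.contains x)) with _ | ⟨a, rest⟩
  · have : pvOccupied tiles = false := by
      rw [pvOccupied, List.any_eq_false]
      intro cell hc
      simp only [Bool.not_eq_true, List.any_eq_false]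
      intro ch hch
      have : ch ∉ (tiles.map String.toList).flatten.filter (fun x => !(pvEmptyChars.contains x)) := by
        rw [h]; simp
      simp only [List.mem_filter, List.mem_flatten, not_and] at this
      have hm : ∃ l ∈ tiles.map String.toList, ch ∈ l :=
        ⟨cell.toList, List.mem_map_of_mem hc, hch⟩
      have := this hm
      simpa using this
    rw [this]; norm_num
  · have : pvOccupied tiles = true := by
      have ha : a ∈ (tiles.map String.toList).flatten.filter (fun x => !(pvEmptyChars.contains x)) := by rw [h]; simp
      simp only [List.mem_filter, List.mem_flatten, List.mem_map] at ha
      obtain ⟨⟨l, ⟨cell, hcell, rfl⟩, hal⟩, hane⟩ := ha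
      rw [pvOccupied]
      simp only [List.any_eq_true]
      exact ⟨cell, hcell, a, hal, hane⟩
    rw [this]
    simp
    omega

theorem pv_occ_append (xs ys : List String) : pvOccupied (xs ++ ys) = (pvOccupied xs || pvOccupied ys) := by
  simp [pvOccupied]

theorem pv_occ_chars (s : String) :
    pvOccupied (s.toList.map (fun ch => String.ofList [ch])) = pvOccupied [s] := by
  simp [pvOccupied, List.any_map, Function.comp_def, String.toList_ofList]

theorem pv_occ_nil : pvOccupied ([] : List String) = false := by simp [pvOccupied]

theorem pv_chain (p1 p2 p3 p4 : Prop) [Decidable p1] [Decidable p2] [Decidable p3] [Decidable p4]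
    (s1 s2 s3 s4 : List String) :
    pvOccupied (if p4 then (if p3 then (if p2 then (if p1 then ([] : List String) ++ s1 else []) ++ s2 else (if p1 then ([] : List String) ++ s1 else [])) ++ s3 else (if p2 then (if p1 then ([] : List String) ++ s1 else []) ++ s2 else (if p1 then ([] : List String) ++ s1 else []))) ++ s4 else (if p3 then (if p2 then (if p1 then ([] : List String) ++ s1 else []) ++ s2 else (if p1 then ([] : List String) ++ s1 else [])) ++ s3 else (if p2 then (if p1 then ([] : List String) ++ s1 else []) ++ s2 else (if p1 then ([] : List String) ++ s1 else []))))
      = (if p1 && pvOccupied s1 then true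
         else if p2 && pvOccupied s2 then true
         else if p3 && pvOccupied s3 then true
         else if p4 && pvOccupied s4 then true
         else false) := by
  by_cases hp1 : p1 <;> by_cases hp2 : p2 <;> by_cases hp3 : p3 <;> by_cases hp4 : p4 <;>
    simp [hp1, hp2, hp3, hp4, pv_occ_append, pv_occ_nil]

-- ===== VERDICT (by name: the statement is the Claim_ definition above) =====
theorem is_word_connected_spec : Claim_equal_is_word_connected := by
  intro loc direction word_len board _hdom _hpre
  unfold Spec_is_word_connected
  by_cases hdh : direction = "h"
  · subst hdh
    have hv : (("h" : String) == "v") = false := by decide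
    simp only [is_word_connected, is_word_connected_alt, beq_self_eq_true, hv,
      Bool.false_eq_true, if_true, if_false]
    rw [pv_A_eval, pv_chain]
    rw [pv_occ_chars, pv_occ_chars]
  · by_cases hdv : direction = "v"
    · subst hdv
      have hh : (("v" : String) == "h") = false := by decide
      simp only [is_word_connected, is_word_connected_alt, beq_self_eq_true, hh,
        Bool.false_eq_true, if_true, if_false]
      rw [pv_A_eval, pv_chain]
      rw [pv_occ_chars, pv_occ_chars]
    · have hh : (direction == "h") = false := by simp [hdh]
      have hv : (direction == "v") = false := by simp [hdv]
      simp only [is_word_connected, is_word_connected_alt, hh, hv, Bool.false_eq_true, if_false]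
      rw [pv_A_eval]
      simp [pv_occ_nil]
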